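-- pv_equiv track=rewrite | github.com/MiguelMque/eafit-numerical-analysis-project | interpolML/interpolML/interpolation/interpolation.py | cut_interval
-- ===== SOURCE A (Python) =====
-- def cut_interval(interval, y_interval, min_pol):
--
--     first_interval = interval[:min_pol+1]
--     first_interval_y = y_interval[:min_pol+1]
--     second_interval = []
--     second_interval_y = []
--
--     done = False
--     for i, x in enumerate(interval[min_pol+1:]):
--         if x != first_interval[-1] + 1 and not done:
--             first_interval.append(x)
--             first_interval_y.append(y_interval[i])
--         else:
--             second_interval.append(x)
--             second_interval_y.append(y_interval[i])
--             done = True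
--
--     return first_interval, second_interval, first_interval_y, second_interval_y
-- ===== SOURCE B (Python) =====
-- def cut_interval(interval, y_interval, min_pol):
--     first = interval[:min_pol+1]
--     pairs = list(zip(interval[min_pol+1:], y_interval))
--     p = 0
--     if pairs:
--         prev = first[-1]
--         for x, _ in pairs:
--             if x == prev + 1:
--                 break
--             prev = x
--             p += 1
--     kept, rest = pairs[:p], pairs[p:]
--     return (first + [x for x, _ in kept],
--             [x for x, _ in rest],
--             y_interval[:min_pol+1] + [y for _, y in kept],
--             [y for _, y in rest])
-- ===== Notes on version B (the rewrite author's own statement) =====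
-- stated objective: simpler
-- what changed: Replaced A's stateful append/done-flag accumulation loop by zipping the tail with its y values once, scanning for the split index (first element equal to its predecessor + 1), and building all four outputs by partitioning that pair list; Pre_ excludes only inputs where A raises IndexError (nonempty tail with empty first slice, or tail longer than y_interval).
import Mathlib
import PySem

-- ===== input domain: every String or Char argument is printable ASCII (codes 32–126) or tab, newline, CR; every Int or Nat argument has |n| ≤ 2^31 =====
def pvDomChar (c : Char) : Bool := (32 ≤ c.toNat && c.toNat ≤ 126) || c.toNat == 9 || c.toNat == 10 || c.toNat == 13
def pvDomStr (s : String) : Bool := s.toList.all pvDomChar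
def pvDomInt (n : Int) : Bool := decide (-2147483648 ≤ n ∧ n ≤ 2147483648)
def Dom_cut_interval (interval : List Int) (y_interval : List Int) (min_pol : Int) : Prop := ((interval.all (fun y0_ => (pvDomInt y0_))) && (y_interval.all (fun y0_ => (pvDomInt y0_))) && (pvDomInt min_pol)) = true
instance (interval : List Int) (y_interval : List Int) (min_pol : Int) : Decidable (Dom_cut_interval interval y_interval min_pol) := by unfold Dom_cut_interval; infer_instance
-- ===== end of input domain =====

-- B replaces A's stateful append/done-flag loop by zipping the tail with its y values once,
-- finding the split index, and partitioning the pair list (objective: simpler).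

-- ===== PORT A =====
-- one loop step of A: state (first, second, first_y, second_y, done), input an enumerate pair (i, x)
def cutStepA (y_interval : List Int) (s : List Int × List Int × List Int × List Int × Bool)
    (ix : Int × Int) : List Int × List Int × List Int × List Int × Bool :=
  if ix.2 ≠ PySem.List.pyGetD s.1 (-1) 0 + 1 ∧ s.2.2.2.2 = false then
    (s.1 ++ [ix.2], s.2.1, s.2.2.1 ++ [PySem.List.pyGetD y_interval ix.1 0], s.2.2.2.1, s.2.2.2.2)
  else
    (s.1, s.2.1 ++ [ix.2], s.2.2.1, s.2.2.2.1 ++ [PySem.List.pyGetD y_interval ix.1 0], true)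

def cut_interval (interval : List Int) (y_interval : List Int) (min_pol : Int) : List Int × List Int × List Int × List Int :=
  let first := PySem.List.slice interval none (some (min_pol + 1))
  let first_y := PySem.List.slice y_interval none (some (min_pol + 1))
  let st := (PySem.List.enumerate (PySem.List.slice interval (some (min_pol + 1)) none) 0).foldl
    (cutStepA y_interval) (first, [], first_y, [], false)
  (st.1, st.2.1, st.2.2.1, st.2.2.2.1)

-- ===== PORT B =====
-- Source B's loop: index of the first pair whose x equals its predecessor's x + 1 (list length if none)
def findSplitB (prev : Int) : List (Int × Int) → Nat
  | [] => 0
  | (x, _) :: ps => if x = prev + 1 then 0 else findSplitB x ps + 1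

def cut_interval_alt (interval : List Int) (y_interval : List Int) (min_pol : Int) : List Int × List Int × List Int × List Int :=
  let first := PySem.List.slice interval none (some (min_pol + 1))
  let pairs := (PySem.List.slice interval (some (min_pol + 1)) none).zip y_interval
  let p : Nat :=
    match pairs with
    | [] => 0
    | _ :: _ => findSplitB (PySem.List.pyGetD first (-1) 0) pairs
  let kept := PySem.List.slice pairs none (some (p : Int))
  let rest := PySem.List.slice pairs (some (p : Int)) none
  (first ++ kept.map Prod.fst, rest.map Prod.fst,
   PySem.List.slice y_interval none (some (min_pol + 1)) ++ kept.map Prod.snd,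
   rest.map Prod.snd)

-- ===== PRECONDITION & SPEC =====
-- Pre_ excludes exactly the inputs where A raises IndexError: a nonempty tail with an empty
-- first slice (first_interval[-1] fails), or a tail longer than y_interval (y_interval[i] fails).
def Pre_cut_interval (interval : List Int) (y_interval : List Int) (min_pol : Int) : Prop :=
  PySem.List.slice interval (some (min_pol + 1)) none = [] ∨
    (PySem.List.slice interval none (some (min_pol + 1)) ≠ [] ∧
     (PySem.List.slice interval (some (min_pol + 1)) none).length ≤ y_interval.length)
instance (interval : List Int) (y_interval : List Int) (min_pol : Int) : Decidable (Pre_cut_interval interval y_interval min_pol) := by unfold Pre_cut_interval; infer_instance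

def pvWitness_cut_interval : List Int × List Int × Int := ([1, 2, 5, 6, 7], [10, 20, 30, 40, 50], 1)

def Spec_cut_interval (interval : List Int) (y_interval : List Int) (min_pol : Int) (out : List Int × List Int × List Int × List Int) : Prop := out = cut_interval_alt interval y_interval min_pol
instance (interval : List Int) (y_interval : List Int) (min_pol : Int) (out : List Int × List Int × List Int × List Int) : Decidable (Spec_cut_interval interval y_interval min_pol out) := by unfold Spec_cut_interval; infer_instance

-- ===== CLAIM (what is proved, stated in full; the proofs are below) =====
def Claim_equal_cut_interval : Prop := ∀ (interval : List Int) (y_interval : List Int) (min_pol : Int), Dom_cut_interval interval y_interval min_pol → Pre_cut_interval interval y_interval min_pol → Spec_cut_interval interval y_interval min_pol (cut_interval interval y_interval min_pol)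

-- ===== LEMMAS AND PROOFS =====

-- abstract split index used to characterise both loops
def findSplit (prev : Int) : List Int → Nat
  | [] => 0
  | t :: ts => if t = prev + 1 then 0 else findSplit t ts + 1

lemma findSplit_le (prev : Int) (ts : List Int) : findSplit prev ts ≤ ts.length := by
  induction ts generalizing prev with
  | nil => simp [findSplit]
  | cons t ts ih =>
    simp only [findSplit]
    split
    · simp
    · simpa using Nat.succ_le_succ (ih t)

-- B's loop depends only on the x components of the pairs
lemma findSplitB_eq (prev : Int) (ps : List (Int × Int)) :
    findSplitB prev ps = findSplit prev (ps.map Prod.fst) := by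
  induction ps generalizing prev with
  | nil => simp [findSplitB, findSplit]
  | cons p ps ih =>
    obtain ⟨x, y⟩ := p
    simp only [findSplitB, findSplit, List.map_cons, ih]

-- once done = true, every remaining element goes to second / second_y
lemma foldl_done (y ts : List Int) : ∀ (i0 : Int) (f s fy sy : List Int),
    (PySem.List.enumerate ts i0).foldl (cutStepA y) (f, s, fy, sy, true) =
      (f, s ++ ts, fy,
       sy ++ (PySem.List.enumerate ts i0).map (fun ix => PySem.List.pyGetD y ix.1 0), true) := by
  induction ts with
  | nil => simp [PySem.List.enumerate_nil]
  | cons t ts ih =>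
    intro i0 f s fy sy
    rw [PySem.List.enumerate_cons]
    simp only [List.foldl_cons, cutStepA, List.map_cons]
    rw [if_neg (by simp)]
    rw [ih]
    simp

-- the loop before the split: characterised by findSplit
lemma foldl_main (y : List Int) (ts : List Int) : ∀ (i0 : Int) (f fy : List Int), f ≠ [] →
    (PySem.List.enumerate ts i0).foldl (cutStepA y) (f, [], fy, [], false) =
      (f ++ ts.take (findSplit (PySem.List.pyGetD f (-1) 0) ts),
       ts.drop (findSplit (PySem.List.pyGetD f (-1) 0) ts),
       fy ++ ((PySem.List.enumerate ts i0).map (fun ix => PySem.List.pyGetD y ix.1 0)).take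
               (findSplit (PySem.List.pyGetD f (-1) 0) ts),
       ((PySem.List.enumerate ts i0).map (fun ix => PySem.List.pyGetD y ix.1 0)).drop
               (findSplit (PySem.List.pyGetD f (-1) 0) ts),
       decide (findSplit (PySem.List.pyGetD f (-1) 0) ts < ts.length)) := by
  induction ts with
  | nil => simp [PySem.List.enumerate_nil, findSplit]
  | cons t ts ih =>
    intro i0 f fy hf
    rw [PySem.List.enumerate_cons]
    simp only [List.foldl_cons, List.map_cons]
    by_cases ht : t = PySem.List.pyGetD f (-1) 0 + 1
    · simp only [cutStepA]
      rw [if_neg (by simp [ht])]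
      simp only [foldl_done]
      simp [findSplit, ht]
    · simp only [cutStepA]
      rw [if_pos (by simp [ht])]
      simp only [ih (i0 + 1) (f ++ [t]) (fy ++ [PySem.List.pyGetD y i0 0]) (by simp),
        PySem.List.pyGetD_neg_one_append_singleton]
      simp only [findSplit, if_neg ht]
      simp [List.append_assoc]

-- the snd components of a zip are an initial segment of the second list
lemma map_snd_zip_take (l y : List Int) : (l.zip y).map Prod.snd = y.take l.length := by
  induction l generalizing y with
  | nil => simp
  | cons a l ih =>
    cases y with
    | nil => simp
    | cons b y => simp [ih]

-- the enumerate-indexed y values are an initial segment of y (when the loop stays in range)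
lemma enum_vals (y : List Int) : ∀ (ts : List Int) (k : Nat), k + ts.length ≤ y.length →
    (PySem.List.enumerate ts (k : Int)).map (fun ix => PySem.List.pyGetD y ix.1 0) =
      (y.drop k).take ts.length := by
  intro ts
  induction ts with
  | nil => simp [PySem.List.enumerate_nil]
  | cons t ts ih =>
    intro k hk
    rw [PySem.List.enumerate_cons]
    simp only [List.map_cons]
    have hk' : k < y.length := by simp at hk; omega
    have h1 : PySem.List.pyGetD y (k : Int) 0 = y[k] := by
      rw [PySem.List.pyGetD_natCast]
      exact List.getD_eq_getElem y 0 hk'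
    have h2 : ((k : Int) + 1) = ((k + 1 : Nat) : Int) := by push_cast; ring
    have h3 : List.drop k y = y[k] :: List.drop (k + 1) y := List.drop_eq_getElem_cons hk'
    rw [h1, h2, ih (k + 1) (by simp at hk ⊢; omega), List.length_cons, h3, List.take_succ_cons]

-- ===== VERDICT (by name: the statement is the Claim_ definition above) =====
theorem cut_interval_spec : Claim_equal_cut_interval := by
  intro interval y min_pol _ hpre
  unfold Spec_cut_interval cut_interval cut_interval_alt
  unfold Pre_cut_interval at hpre
  simp only []
  generalize hF : PySem.List.slice interval none (some (min_pol + 1)) = first at *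
  generalize hT : PySem.List.slice interval (some (min_pol + 1)) none = tail at *
  cases tail with
  | nil => simp [PySem.List.enumerate_nil, PySem.List.slice]
  | cons t ts =>
    rcases hpre with hemp | ⟨hf, hlen⟩
    · exact absurd hemp (by simp)
    -- the zip of the tail with y is full: its fst's are the tail, its snd's an initial segment of y
    have hzlen : ((t :: ts).zip y).length = (t :: ts).length := by
      rw [List.length_zip]; omega
    have hfst : ((t :: ts).zip y).map Prod.fst = t :: ts := List.map_fst_zip hlen
    have hsnd : ((t :: ts).zip y).map Prod.snd = y.take (t :: ts).length :=
      map_snd_zip_take (t :: ts) y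
    have hpB : findSplitB (PySem.List.pyGetD first (-1) 0) ((t :: ts).zip y) =
        findSplit (PySem.List.pyGetD first (-1) 0) (t :: ts) := by
      rw [findSplitB_eq, hfst]
    have hpL : findSplit (PySem.List.pyGetD first (-1) 0) (t :: ts) ≤ (t :: ts).length :=
      findSplit_le _ _
    have hvals : (PySem.List.enumerate (t :: ts) (0 : Int)).map
        (fun ix => PySem.List.pyGetD y ix.1 0) = y.take (t :: ts).length := by
      simpa using enum_vals y (t :: ts) 0 (by omega)
    have hmain := foldl_main y (t :: ts) 0 first (PySem.List.slice y none (some (min_pol + 1))) hf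
    rw [hvals] at hmain
    simp only [hmain]
    cases hz : (t :: ts).zip y with
    | nil => rw [hz] at hzlen; simp at hzlen
    | cons q qs =>
      rw [hz] at hpB hfst hsnd
      simp only [hpB]
      
      rw [PySem.List.slice_to_natCast, PySem.List.slice_from_natCast]
      refine Prod.ext ?_ (Prod.ext ?_ (Prod.ext ?_ ?_)) <;> simp only []
      · rw [List.map_take, hfst]
      · rw [List.map_drop, hfst]
      · rw [List.map_take, hsnd, List.take_take, Nat.min_eq_left hpL]
      · rw [List.map_drop, hsnd]
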